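-- pv_equiv track=rewrite | github.com/Sarmed2003/OnePromptAISubAgents | oneprompt/llm_client.py | _find_json_string_end
-- ===== SOURCE A (Python) =====
-- def _find_json_string_end(text: str, start: int) -> int:
--     """Find the closing quote of a JSON string value, respecting escape sequences.
--
--     Returns the index of the closing quote, or -1 if the string is unterminated.
--     """
--     i = start
--     while i < len(text):
--         ch = text[i]
--         if ch == "\\":
--             i += 2
--             continue
--         if ch == '"':
--             return i
--         i += 1
--     return -1
-- ===== SOURCE B (Python) =====
-- def _find_json_string_end(text: str, start: int) -> int:
--     """Find the closing quote of a JSON string value, respecting escape sequences.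
--
--     Uses str.find to jump between the next quote and the next backslash instead
--     of stepping one character at a time.
--     """
--     i = start
--     while True:
--         nq = text.find('"', i)
--         if nq == -1:
--             return -1
--         nb = text.find('\\', i)
--         if nb == -1 or nq < nb:
--             return nq
--         i = nb + 2
-- ===== Notes on version B (the rewrite author's own statement) =====
-- stated objective: faster
-- what changed: Replaces the per-character while-loop with str.find jumps: find the next quote and the next backslash, return the quote if it comes first, otherwise skip past the escape pair and repeat, so scanning is done by C-level find.
-- outside the precondition, e.g. on _find_json_string_end('"', -1): A returns -1, B returns 0
import Mathlib
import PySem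

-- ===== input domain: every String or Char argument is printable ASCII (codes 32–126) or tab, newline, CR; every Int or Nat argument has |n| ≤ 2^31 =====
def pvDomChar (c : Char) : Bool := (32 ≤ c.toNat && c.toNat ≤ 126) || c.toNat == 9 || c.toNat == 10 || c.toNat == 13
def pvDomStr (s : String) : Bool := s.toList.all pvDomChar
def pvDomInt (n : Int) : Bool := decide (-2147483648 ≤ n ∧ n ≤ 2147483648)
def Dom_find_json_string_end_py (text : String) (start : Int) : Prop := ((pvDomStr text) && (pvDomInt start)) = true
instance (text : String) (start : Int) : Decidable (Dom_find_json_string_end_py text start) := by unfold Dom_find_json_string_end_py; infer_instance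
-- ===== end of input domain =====

-- B replaces A's per-character while-loop with str.find jumps between the next quote and the next backslash.

-- ===== PORT A =====
-- A's while-loop: step one char at a time; on '\' skip two, on '"' return the index.
-- fuel is only a structural-totality guard: cs.length + 1 steps always suffice (i strictly increases).
def pvAux_goA (cs : List Char) (fuel : Nat) (i : Int) : Int :=
  match fuel with
  | 0 => -1
  | fuel + 1 =>
    if i < (cs.length : Int) then
      match PySem.List.pyGet? cs i with
      | none => -1  -- Python raises IndexError here (negative index out of range); outside Pre_
      | some ch =>
        if ch = '\\' then pvAux_goA cs fuel (i + 2)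
        else if ch = '"' then i
        else pvAux_goA cs fuel (i + 1)
    else -1

def find_json_string_end_py (text : String) (start : Int) : Int :=
  pvAux_goA text.toList (text.toList.length + 1) start

-- ===== PORT B =====
-- B's loop: nq = text.find('"', i); nb = text.find('\\', i); return nq, or skip past the escape
-- pair at nb and repeat.  fuel is only a structural-totality guard: each repeat consumes a distinct
-- backslash position, so cs.length + 1 rounds always suffice.
def pvAux_goB (cs : List Char) (fuel : Nat) (i : Int) : Int :=
  match fuel with
  | 0 => -1
  | fuel + 1 =>
    let nq := PySem.Chars.findFrom cs ['"'] i none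
    if nq = -1 then -1
    else
      let nb := PySem.Chars.findFrom cs ['\\'] i none
      if nb = -1 ∨ nq < nb then nq
      else pvAux_goB cs fuel (nb + 2)

def find_json_string_end_py_alt (text : String) (start : Int) : Int :=
  pvAux_goB text.toList (text.toList.length + 1) start

-- ===== PRECONDITION & SPEC =====
-- Pre_ excludes negative start, where A either raises IndexError (start < -len(text))
-- or returns an accidental negative-index wraparound result that no caller relies on.
def Pre_find_json_string_end_py (text : String) (start : Int) : Prop := 0 ≤ start
instance (text : String) (start : Int) : Decidable (Pre_find_json_string_end_py text start) := by
  unfold Pre_find_json_string_end_py; infer_instance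

def pvWitness_find_json_string_end_py : String × Int := ("\"ab\\\"c\" rest", 1)

def Spec_find_json_string_end_py (text : String) (start : Int) (out : Int) : Prop :=
  out = find_json_string_end_py_alt text start
instance (text : String) (start : Int) (out : Int) : Decidable (Spec_find_json_string_end_py text start out) := by
  unfold Spec_find_json_string_end_py; infer_instance

-- ===== CLAIM (what is proved, stated in full; the proofs are below) =====
def Claim_equal_find_json_string_end_py : Prop := ∀ (text : String) (start : Int), Dom_find_json_string_end_py text start → Pre_find_json_string_end_py text start → Spec_find_json_string_end_py text start (find_json_string_end_py text start)

-- ===== LEMMAS AND PROOFS =====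

theorem pvFindFrom_of_gt_len (s sub : List Char) (i : Int) (h : (s.length : Int) < i) :
    PySem.Chars.findFrom s sub i none = -1 := by
  unfold PySem.Chars.findFrom
  simp only
  split_ifs <;> omega

-- pyGet? at a nonnegative index
theorem pvPyGet_nonneg (cs : List Char) (i : Int) (h0 : 0 ≤ i) (_h1 : i < (cs.length : Int)) :
    PySem.List.pyGet? cs i = cs[i.toNat]? := by
  have hi : i = ((i.toNat : Nat) : Int) := by omega
  rw [hi, PySem.List.pyGet?_natCast, Int.toNat_natCast]

-- A's loop does not depend on the fuel once the fuel dominates the remaining length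
theorem pvGoA_fuel (cs : List Char) :
    ∀ f f' (i : Int), 0 ≤ i → ((cs.length : Int) - i).toNat < f → ((cs.length : Int) - i).toNat < f' →
      pvAux_goA cs f i = pvAux_goA cs f' i := by
  intro f
  induction f with
  | zero => intro f' i _ hf _; omega
  | succ f ih =>
    intro f' i h0 hf hf'
    match f' with
    | 0 => omega
    | f' + 1 =>
      show (if i < (cs.length : Int) then _ else (-1:Int)) = (if i < (cs.length : Int) then _ else (-1:Int))
      by_cases hlt : i < (cs.length : Int)
      · rw [if_pos hlt, if_pos hlt]
        cases PySem.List.pyGet? cs i with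
        | none => rfl
        | some ch =>
          show (if ch = '\\' then pvAux_goA cs f (i + 2) else if ch = '"' then i else pvAux_goA cs f (i + 1))
             = (if ch = '\\' then pvAux_goA cs f' (i + 2) else if ch = '"' then i else pvAux_goA cs f' (i + 1))
          by_cases hb : ch = '\\'
          · rw [if_pos hb, if_pos hb]
            exact ih f' (i + 2) (by omega) (by omega) (by omega)
          · rw [if_neg hb, if_neg hb]
            by_cases hq : ch = '"'
            · rw [if_pos hq, if_pos hq]
            · rw [if_neg hq, if_neg hq]
              exact ih f' (i + 1) (by omega) (by omega) (by omega)
      · rw [if_neg hlt, if_neg hlt]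

-- canonical fuel for position i
theorem pvGoA_no_quote (cs : List Char) :
    ∀ n (i : Int), (((cs.length : Int) - i).toNat ≤ n) → 0 ≤ i →
      (∀ j : Nat, i ≤ (j : Int) → cs[j]? ≠ some '"') →
      pvAux_goA cs (((cs.length : Int) - i).toNat + 1) i = -1 := by
  intro n
  induction n with
  | zero =>
    intro i hn h0 _
    show (if i < (cs.length : Int) then _ else (-1:Int)) = -1
    rw [if_neg (by omega)]
  | succ n ih =>
    intro i hn h0 hq
    show (if i < (cs.length : Int) then _ else (-1:Int)) = -1
    by_cases hlt : i < (cs.length : Int)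
    · rw [if_pos hlt, pvPyGet_nonneg cs i h0 hlt]
      have hget : cs[i.toNat]? = some cs[i.toNat] := by
        rw [List.getElem?_eq_getElem (by omega)]
      rw [hget]
      show (if cs[i.toNat] = '\\' then pvAux_goA cs (((cs.length : Int) - i).toNat) (i + 2)
            else if cs[i.toNat] = '"' then i else pvAux_goA cs (((cs.length : Int) - i).toNat) (i + 1)) = -1
      have hnq : cs[i.toNat] ≠ '"' := by
        intro hh
        exact hq i.toNat (by omega) (by rw [hget, hh])
      by_cases hb : cs[i.toNat] = '\\'
      · rw [if_pos hb,
          pvGoA_fuel cs (((cs.length : Int) - i).toNat) (((cs.length : Int) - (i+2)).toNat + 1) (i+2)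
            (by omega) (by omega) (by omega)]
        exact ih (i + 2) (by omega) (by omega) (fun j hj => hq j (by omega))
      · rw [if_neg hb, if_neg hnq,
          pvGoA_fuel cs (((cs.length : Int) - i).toNat) (((cs.length : Int) - (i+1)).toNat + 1) (i+1)
            (by omega) (by omega) (by omega)]
        exact ih (i + 1) (by omega) (by omega) (fun j hj => hq j (by omega))
    · rw [if_neg hlt]

theorem pvGoA_clean (cs : List Char) :
    ∀ n (i t : Int), ((t - i).toNat ≤ n) → 0 ≤ i → i ≤ t → t ≤ (cs.length : Int) →
      (∀ j : Nat, i ≤ (j : Int) → (j : Int) < t → cs[j]? ≠ some '"' ∧ cs[j]? ≠ some '\\') →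
      pvAux_goA cs (((cs.length : Int) - i).toNat + 1) i
        = pvAux_goA cs (((cs.length : Int) - t).toNat + 1) t := by
  intro n
  induction n with
  | zero =>
    intro i t hn h0 hit _ _
    have : i = t := by omega
    rw [this]
  | succ n ih =>
    intro i t hn h0 hit hlen hcl
    by_cases heq : i = t
    · rw [heq]
    · have hlt : i < (cs.length : Int) := by omega
      show (if i < (cs.length : Int) then _ else (-1:Int)) = _
      rw [if_pos hlt, pvPyGet_nonneg cs i h0 hlt]
      have hget : cs[i.toNat]? = some cs[i.toNat] := by
        rw [List.getElem?_eq_getElem (by omega)]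
      rw [hget]
      show (if cs[i.toNat] = '\\' then pvAux_goA cs (((cs.length : Int) - i).toNat) (i + 2)
            else if cs[i.toNat] = '"' then i else pvAux_goA cs (((cs.length : Int) - i).toNat) (i + 1))
          = pvAux_goA cs (((cs.length : Int) - t).toNat + 1) t
      have hc := hcl i.toNat (by omega) (by omega)
      rw [hget] at hc
      have hnq : cs[i.toNat] ≠ '"' := fun hh => hc.1 (by rw [hh])
      have hnb : cs[i.toNat] ≠ '\\' := fun hh => hc.2 (by rw [hh])
      rw [if_neg hnb, if_neg hnq,
        pvGoA_fuel cs (((cs.length : Int) - i).toNat) (((cs.length : Int) - (i+1)).toNat + 1) (i+1)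
          (by omega) (by omega) (by omega)]
      exact ih (i + 1) t (by omega) (by omega) (by omega) hlen
        (fun j hj hjt => hcl j (by omega) hjt)

theorem pvSingleton_prefix {c : Char} {l : List Char} :
    [c] <+: l ↔ l.head? = some c := by
  cases l with
  | nil => simp
  | cons a t =>
    constructor
    · rintro ⟨r, hr⟩; simp at hr; simp [hr.1]
    · intro h; simp at h; exact ⟨t, by simp [h]⟩

theorem pvSingleton_prefix_drop {c : Char} {l : List Char} {j : Nat} :
    [c] <+: l.drop j ↔ l[j]? = some c := by
  rw [pvSingleton_prefix, List.head?_drop]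

theorem pvSingleton_infix {c : Char} {l : List Char} :
    [c] <:+: l ↔ c ∈ l := by
  constructor
  · rintro ⟨p, s, h⟩; subst h; simp
  · intro h
    obtain ⟨p, s, h⟩ := List.append_of_mem h
    exact ⟨p, s, by simp [h]⟩

-- no occurrence of c at or after k, stated on getElem?
theorem pvNotInfix_getElem {c : Char} {cs : List Char} {k : Nat}
    (h : ¬ [c] <:+: cs.drop k) :
    ∀ j : Nat, k ≤ j → cs[j]? ≠ some c := by
  intro j hkj hc
  apply h
  rw [pvSingleton_infix]
  have hj : j < cs.length := by
    by_contra hh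
    rw [List.getElem?_eq_none (by omega)] at hc
    simp at hc
  have hcc : cs[j] = c := by
    rw [List.getElem?_eq_getElem hj] at hc
    injection hc
  subst hcc
  rw [List.mem_iff_getElem?]
  have hkj' : k + (j - k) = j := by omega
  exact ⟨j - k, by rw [List.getElem?_drop, hkj', List.getElem?_eq_getElem hj]⟩

-- B returns -1 whenever there is no quote at or after i, for any fuel
theorem pvGoB_none (cs : List Char) (fb : Nat) (i : Int)
    (hq : PySem.Chars.findFrom cs ['"'] i none = -1) :
    pvAux_goB cs fb i = -1 := by
  match fb with
  | 0 => rfl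
  | g + 1 =>
    show (let nq := PySem.Chars.findFrom cs ['"'] i none;
          if nq = -1 then (-1:Int) else
            let nb := PySem.Chars.findFrom cs ['\\'] i none
            if nb = -1 ∨ nq < nb then nq else pvAux_goB cs g (nb + 2)) = -1
    simp only [hq]
    norm_num

theorem pvMain (cs : List Char) :
    ∀ n (i : Int) (fb : Nat), (((cs.length : Int) + 2 - i).toNat ≤ n) →
      (((cs.length : Int) + 2 - i).toNat ≤ 2 * fb) → 0 ≤ i →
      pvAux_goA cs (((cs.length : Int) - i).toNat + 1) i = pvAux_goB cs fb i := by
  intro n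
  induction n with
  | zero =>
    intro i fb hn hfb h0
    rw [pvGoB_none cs fb i (pvFindFrom_of_gt_len cs ['"'] i (by omega))]
    show (if i < (cs.length : Int) then _ else (-1:Int)) = -1
    rw [if_neg (by omega)]
  | succ n ih =>
    intro i fb hn hfb h0
    by_cases hlen : (cs.length : Int) < i
    · rw [pvGoB_none cs fb i (pvFindFrom_of_gt_len cs ['"'] i hlen)]
      show (if i < (cs.length : Int) then _ else (-1:Int)) = -1
      rw [if_neg (by omega)]
    · push_neg at hlen
      have hfb1 : ∃ g, fb = g + 1 := ⟨fb - 1, by omega⟩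
      obtain ⟨g, hg⟩ := hfb1
      subst hg
      have hk : i = ((i.toNat : Nat) : Int) := by omega
      have hkl : i.toNat ≤ cs.length := by omega
      by_cases hq : PySem.Chars.findFrom cs ['"'] i none = -1
      · rw [pvGoB_none cs (g + 1) i hq]
        have hnoq : ¬ ['"'] <:+: cs.drop i.toNat := by
          rw [← PySem.Chars.findFrom_natCast_eq_neg_one_iff cs ['"'] i.toNat hkl, ← hk]
          exact hq
        exact pvGoA_no_quote cs (((cs.length : Int) - i).toNat) i le_rfl h0
          (fun j hj => pvNotInfix_getElem hnoq j (by omega))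
      · have hspec := PySem.Chars.findFrom_natCast_spec cs ['"'] i.toNat hkl (by rw [← hk]; exact hq)
        rw [← hk] at hspec
        obtain ⟨hq1, hq2, hq3⟩ := hspec
        set nq := PySem.Chars.findFrom cs ['"'] i none with hnq
        rw [pvSingleton_prefix_drop] at hq2
        have hq0 : 0 ≤ nq := le_trans h0 hq1
        have hqlen : nq.toNat < cs.length := by
          by_contra hh
          rw [List.getElem?_eq_none (by omega)] at hq2
          simp at hq2
        have hqmin : ∀ j : Nat, i ≤ (j:Int) → (j:Int) < nq → cs[j]? ≠ some '"' := by
          intro j hj1 hj2 hc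
          exact hq3 j (by omega) (by omega) (pvSingleton_prefix_drop.mpr hc)
        by_cases hcond : PySem.Chars.findFrom cs ['\\'] i none = -1 ∨
            nq < PySem.Chars.findFrom cs ['\\'] i none
        · -- B returns nq; A walks the clean run [i, nq) and stops on the quote
          show _ = (let nq' := PySem.Chars.findFrom cs ['"'] i none;
                    if nq' = -1 then (-1:Int) else
                      let nb := PySem.Chars.findFrom cs ['\\'] i none
                      if nb = -1 ∨ nq' < nb then nq' else pvAux_goB cs g (nb + 2))
          simp only [← hnq, hq, if_pos hcond]
          have hnob : ∀ j : Nat, i ≤ (j:Int) → (j:Int) < nq → cs[j]? ≠ some '\\' := by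
            rcases hcond with hb1 | hb2
            · have hnb : ¬ ['\\'] <:+: cs.drop i.toNat := by
                rw [← PySem.Chars.findFrom_natCast_eq_neg_one_iff cs ['\\'] i.toNat hkl, ← hk]
                exact hb1
              exact fun j hj _ => pvNotInfix_getElem hnb j (by omega)
            · have hbspec := PySem.Chars.findFrom_natCast_spec cs ['\\'] i.toNat hkl
                (by rw [← hk]; intro hh; rw [hh] at hb2; omega)
              rw [← hk] at hbspec
              intro j hj1 hj2 hc
              exact hbspec.2.2 j (by omega) (by omega) (pvSingleton_prefix_drop.mpr hc)
          rw [pvGoA_clean cs ((nq - i).toNat) i nq le_rfl h0 hq1 (by omega)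
            (fun j hj1 hj2 => ⟨hqmin j hj1 hj2, hnob j hj1 hj2⟩)]
          show (if nq < (cs.length : Int) then _ else (-1:Int)) = nq
          rw [if_pos (by omega), pvPyGet_nonneg cs nq hq0 (by omega), hq2]
          show (if '"' = '\\' then pvAux_goA cs (((cs.length : Int) - nq).toNat) (nq + 2)
                else if ('"' : Char) = '"' then nq else pvAux_goA cs (((cs.length : Int) - nq).toNat) (nq + 1)) = nq
          rw [if_neg (by decide), if_pos rfl]
        · -- B skips past the escape at nb; A walks the clean run [i, nb) and skips two
          push_neg at hcond
          obtain ⟨hb1, hb2⟩ := hcond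
          have hbspec := PySem.Chars.findFrom_natCast_spec cs ['\\'] i.toNat hkl (by rw [← hk]; exact hb1)
          rw [← hk] at hbspec
          obtain ⟨hbl, hbp, hbmin⟩ := hbspec
          set nb := PySem.Chars.findFrom cs ['\\'] i none with hnbdef
          rw [pvSingleton_prefix_drop] at hbp
          have hb0 : 0 ≤ nb := le_trans h0 hbl
          have hblen : nb.toNat < cs.length := by
            by_contra hh
            rw [List.getElem?_eq_none (by omega)] at hbp
            simp at hbp
          show _ = (let nq' := PySem.Chars.findFrom cs ['"'] i none;
                    if nq' = -1 then (-1:Int) else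
                      let nb' := PySem.Chars.findFrom cs ['\\'] i none
                      if nb' = -1 ∨ nq' < nb' then nq' else pvAux_goB cs g (nb' + 2))
          simp only [← hnq, ← hnbdef, hq,
            if_neg (show ¬(nb = -1 ∨ nq < nb) by rintro (hh | hh); exacts [hb1 hh, by omega])]
          rw [pvGoA_clean cs ((nb - i).toNat) i nb le_rfl h0 hbl (by omega)
            (fun j hj1 hj2 => ⟨hqmin j hj1 (by omega),
              fun hc => hbmin j (by omega) (by omega) (pvSingleton_prefix_drop.mpr hc)⟩)]
          show (if nb < (cs.length : Int) then _ else (-1:Int)) = pvAux_goB cs g (nb + 2)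
          rw [if_pos (by omega), pvPyGet_nonneg cs nb hb0 (by omega), hbp]
          show (if '\\' = '\\' then pvAux_goA cs (((cs.length : Int) - nb).toNat) (nb + 2)
                else if ('\\' : Char) = '"' then nb else pvAux_goA cs (((cs.length : Int) - nb).toNat) (nb + 1))
              = pvAux_goB cs g (nb + 2)
          rw [if_pos rfl,
            pvGoA_fuel cs (((cs.length : Int) - nb).toNat) (((cs.length : Int) - (nb+2)).toNat + 1) (nb+2)
              (by omega) (by omega) (by omega)]
          exact ih (nb + 2) g (by omega) (by omega) (by omega)

-- ===== VERDICT (by name: the statement is the Claim_ definition above) =====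
theorem find_json_string_end_py_spec : Claim_equal_find_json_string_end_py := by
  intro text start _hdom hpre
  have h0 : (0:Int) ≤ start := hpre
  unfold Spec_find_json_string_end_py find_json_string_end_py find_json_string_end_py_alt
  rw [pvGoA_fuel text.toList (text.toList.length + 1) (((text.toList.length : Int) - start).toNat + 1) start
    h0 (by omega) (by omega)]
  exact pvMain text.toList (((text.toList.length : Int) + 2 - start).toNat) start (text.toList.length + 1)
    le_rfl (by omega) h0
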